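-- pv_equiv track=rewrite | github.com/brunsp10/Machine-Learning-Project | ada-boost.py | assign_quantiles
-- ===== SOURCE A (Python) =====
-- def assign_quantiles(data, attr, quantiles):
--     results = []
--     for i in range(len(data)):
--         if data[i] >= quantiles[2]:
--             results.append("Fourth")
--         elif data[i] >= quantiles[1]:
--             results.append("Third")
--         elif data[i] >= quantiles[0]:
--             results.append("Second")
--         else:
--             results.append("First")
--     return results
-- ===== SOURCE B (Python) =====
-- def assign_quantiles(data, attr, quantiles):
--     labels = ["Second", "Third", "Fourth"]
--     results = ["First"] * len(data)
--     for j in range(3):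
--         results = [labels[j] if x >= quantiles[j] else r
--                    for x, r in zip(data, results)]
--     return results
-- ===== Notes on version B (the rewrite author's own statement) =====
-- stated objective: alternative
-- what changed: Replaces A's per-element if/elif cascade by three staged whole-list overwrite passes: start with all 'First', then for each threshold in ascending order rewrite the label of every element meeting it, so the last pass that fires wins.
import Mathlib
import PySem

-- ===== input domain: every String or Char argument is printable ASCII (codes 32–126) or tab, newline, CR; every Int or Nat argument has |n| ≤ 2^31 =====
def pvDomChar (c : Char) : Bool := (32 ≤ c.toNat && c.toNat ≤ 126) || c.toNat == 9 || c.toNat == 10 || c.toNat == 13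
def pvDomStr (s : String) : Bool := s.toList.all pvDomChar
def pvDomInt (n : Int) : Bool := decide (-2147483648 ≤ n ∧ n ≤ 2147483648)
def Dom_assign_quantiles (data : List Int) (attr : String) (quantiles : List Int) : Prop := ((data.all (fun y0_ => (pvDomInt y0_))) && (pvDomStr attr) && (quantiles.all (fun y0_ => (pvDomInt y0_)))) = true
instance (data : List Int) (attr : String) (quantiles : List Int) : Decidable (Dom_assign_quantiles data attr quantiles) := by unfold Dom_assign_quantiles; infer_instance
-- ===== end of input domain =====

-- ===== PORT A =====
-- B replaces A's per-element if/elif cascade by three staged whole-list overwrite passes; alternative structure, same cost.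
def assign_quantiles (data : List Int) (attr : String) (quantiles : List Int) : List String :=
  (PySem.List.pyRange 0 (PySem.List.len data) 1).foldl
    (fun results i =>
      if PySem.List.pyGetD data i 0 ≥ PySem.List.pyGetD quantiles 2 0 then results ++ ["Fourth"]
      else if PySem.List.pyGetD data i 0 ≥ PySem.List.pyGetD quantiles 1 0 then results ++ ["Third"]
      else if PySem.List.pyGetD data i 0 ≥ PySem.List.pyGetD quantiles 0 0 then results ++ ["Second"]
      else results ++ ["First"]) []

-- ===== PORT B =====
def pvLabels : List String := ["Second", "Third", "Fourth"]

def assign_quantiles_alt (data : List Int) (attr : String) (quantiles : List Int) : List String :=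
  (PySem.List.pyRange 0 3 1).foldl
    (fun results j =>
      (data.zip results).map (fun xr =>
        if xr.1 ≥ PySem.List.pyGetD quantiles j 0 then PySem.List.pyGetD pvLabels j "" else xr.2))
    (List.replicate data.length "First")

-- ===== PRECONDITION & SPEC =====
-- Pre_ excludes exactly the inputs where Python A raises IndexError: nonempty data with fewer than 3 quantile thresholds.
def Pre_assign_quantiles (data : List Int) (attr : String) (quantiles : List Int) : Prop :=
  data ≠ [] → 3 ≤ quantiles.length
instance (data : List Int) (attr : String) (quantiles : List Int) : Decidable (Pre_assign_quantiles data attr quantiles) := by unfold Pre_assign_quantiles; infer_instance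
def pvWitness_assign_quantiles : List Int × String × List Int := ([1, 5, -2, 9], "age", ([0, 3, 7] : List Int))
def Spec_assign_quantiles (data : List Int) (attr : String) (quantiles : List Int) (out : List String) : Prop := out = assign_quantiles_alt data attr quantiles
instance (data : List Int) (attr : String) (quantiles : List Int) (out : List String) : Decidable (Spec_assign_quantiles data attr quantiles out) := by unfold Spec_assign_quantiles; infer_instance

-- ===== CLAIM (what is proved, stated in full; the proofs are below) =====
def Claim_equal_assign_quantiles : Prop := ∀ (data : List Int) (attr : String) (quantiles : List Int), Dom_assign_quantiles data attr quantiles → Pre_assign_quantiles data attr quantiles → Spec_assign_quantiles data attr quantiles (assign_quantiles data attr quantiles)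

-- ===== LEMMAS AND PROOFS =====

theorem pvFoldA (g : Int → String) :
    ∀ (l : List Int) (acc : List String),
      l.foldl (fun r x => r ++ [g x]) acc = acc ++ l.map g := by
  intro l
  induction l with
  | nil => simp
  | cons a t ih => intro acc; simp [List.foldl_cons, ih]

-- one overwrite pass over (data zipped with a map of data) fuses into a single map
theorem pvPass (P : Int → Prop) [DecidablePred P] (c : String) (f : Int → String) :
    ∀ (l : List Int),
      (l.zip (l.map f)).map (fun xr => if P xr.1 then c else xr.2)
        = l.map (fun x => if P x then c else f x) := by
  intro l
  induction l with
  | nil => rfl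
  | cons a t ih => simp [List.zip_cons_cons, ih]

theorem assign_quantiles_eq (data : List Int) (attr : String) (q0 q1 q2 : Int) (rest : List Int) :
    assign_quantiles data attr (q0 :: q1 :: q2 :: rest)
      = assign_quantiles_alt data attr (q0 :: q1 :: q2 :: rest) := by
  have e0 : PySem.List.pyGetD (q0 :: q1 :: q2 :: rest) 0 0 = q0 := by
    simp [PySem.List.pyGetD_ofNat']
  have e1 : PySem.List.pyGetD (q0 :: q1 :: q2 :: rest) 1 0 = q1 := by
    simp [PySem.List.pyGetD_ofNat']
  have e2 : PySem.List.pyGetD (q0 :: q1 :: q2 :: rest) 2 0 = q2 := by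
    simp [PySem.List.pyGetD_ofNat']
  -- A side: fold over indices = one map with the cascade
  have hA : assign_quantiles data attr (q0 :: q1 :: q2 :: rest)
      = data.map (fun x => if x ≥ q2 then "Fourth" else if x ≥ q1 then "Third"
                           else if x ≥ q0 then "Second" else "First") := by
    unfold assign_quantiles
    have hfold := PySem.List.foldl_pyRange_zero_pyGetD
      (f := fun (r : List String) (x : Int) =>
        if x ≥ PySem.List.pyGetD (q0 :: q1 :: q2 :: rest) 2 0 then r ++ ["Fourth"]
        else if x ≥ PySem.List.pyGetD (q0 :: q1 :: q2 :: rest) 1 0 then r ++ ["Third"]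
        else if x ≥ PySem.List.pyGetD (q0 :: q1 :: q2 :: rest) 0 0 then r ++ ["Second"]
        else r ++ ["First"])
      (xs := data) (d := 0) (init := ([] : List String))
    rw [hfold, e0, e1, e2]
    have hbody : ∀ (r : List String) (x : Int),
        (if x ≥ q2 then r ++ ["Fourth"] else if x ≥ q1 then r ++ ["Third"]
         else if x ≥ q0 then r ++ ["Second"] else r ++ ["First"])
        = r ++ [if x ≥ q2 then "Fourth" else if x ≥ q1 then "Third"
                else if x ≥ q0 then "Second" else "First"] := by
      intro r x; split_ifs <;> rfl
    simp only [hbody]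
    rw [pvFoldA]
    simp
  -- B side: three staged passes fuse into the same map
  have hB : assign_quantiles_alt data attr (q0 :: q1 :: q2 :: rest)
      = data.map (fun x => if x ≥ q2 then "Fourth" else if x ≥ q1 then "Third"
                           else if x ≥ q0 then "Second" else "First") := by
    unfold assign_quantiles_alt
    have hr : PySem.List.pyRange 0 3 1 = [0, 1, 2] := by decide
    rw [hr]
    simp only [List.foldl_cons, List.foldl_nil]
    have hl0 : PySem.List.pyGetD pvLabels 0 "" = "Second" := by decide
    have hl1 : PySem.List.pyGetD pvLabels 1 "" = "Third" := by decide
    have hl2 : PySem.List.pyGetD pvLabels 2 "" = "Fourth" := by decide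
    rw [e0, e1, e2, hl0, hl1, hl2]
    have hrep : List.replicate data.length "First" = data.map (fun _ => "First") := by
      simp
    rw [hrep]
    rw [pvPass (P := fun x => x ≥ q0) (c := "Second") (f := fun _ => "First")]
    rw [pvPass (P := fun x => x ≥ q1) (c := "Third")
        (f := fun x => if x ≥ q0 then "Second" else "First")]
    rw [pvPass (P := fun x => x ≥ q2) (c := "Fourth")
        (f := fun x => if x ≥ q1 then "Third"
                       else if x ≥ q0 then "Second" else "First")]
  rw [hA, hB]

-- ===== VERDICT =====
theorem assign_quantiles_spec : Claim_equal_assign_quantiles := by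
  intro data attr quantiles _ hpre
  unfold Spec_assign_quantiles
  rcases List.eq_nil_or_concat data with hd | _
  · subst hd
    have hr : PySem.List.pyRange 0 3 1 = [0, 1, 2] := by decide
    simp [assign_quantiles, assign_quantiles_alt, PySem.List.len, hr]
  · have hq : 3 ≤ quantiles.length := by
      apply hpre
      rename_i h; rcases h with ⟨l, a, rfl⟩; simp
    obtain ⟨q0, q1, q2, rest, rfl⟩ : ∃ q0 q1 q2 rest, quantiles = q0 :: q1 :: q2 :: rest := by
      match quantiles, hq with
      | q0 :: q1 :: q2 :: rest, _ => exact ⟨q0, q1, q2, rest, rfl⟩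
    rw [assign_quantiles_eq]
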